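-- pv_equiv track=rewrite | github.com/virendra-nishad/wikipedia-articles-exploration | Code_and_Data/2category_tree.py | dfs
-- ===== SOURCE A (Python) =====
-- def dfs(tree, root, counter, visited):
--     q = []
--
--     adding_first_node_to_q = str(root)
--     q.append(adding_first_node_to_q)
--
--     categories_id_dict = {}
--
--     while len(q) > 0:
--         front = q.pop(0)
--
--         # Below code will use to prepare ID of form CXXXX
--         temp_id = str(counter)
--         temp_id = temp_id.zfill(4)
--         temp_id = "C" + temp_id
--         categories_id_dict[front] = temp_id
--         counter += 1
--
--         # We need a split here bcoz we are saving node from root to current node as node key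
--         # That is we are building back tree from heierchy tree, below are few examples of heierchy
--         # Subject.Art
--         # Subject.Art.Art
--         # Subject.Art.Artist
--         # So we are provided node details in cumulative form i.e from root to current node
--         temp2 = front.split('.')
--         # prefix = temp2[0]
--         # for i in range(1, len(temp2)-1):
--         #     prefix = prefix + "." str(temp2)
--         suffix = temp2[len(temp2)-1]
--
--         if suffix in tree.keys():
--             for adj in tree[suffix]:
--                 q.append(str(front) + "." + str(adj))
--
--     return categories_id_dict
-- ===== SOURCE B (Python) =====
-- def dfs(tree, root, counter, visited):
--     # Different algorithm: depth-first traversal (explicit LIFO stack) collecting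
--     # (depth, path) pairs, then a stable sort by depth recovers the breadth-first
--     # numbering, and the ids are assigned in one enumeration pass.
--     order = []
--     stack = [(0, str(root))]
--     while stack:
--         depth, path = stack.pop()
--         order.append((depth, path))
--         suffix = path.split('.')[-1]
--         if suffix in tree:
--             for adj in reversed(tree[suffix]):
--                 stack.append((depth + 1, path + "." + adj))
--     order.sort(key=lambda dp: dp[0])
--     return {path: "C" + str(counter + i).zfill(4)
--             for i, (_, path) in enumerate(order)}
-- ===== Notes on version B (the rewrite author's own statement) =====
-- stated objective: alternative
-- what changed: Replaced the FIFO-queue BFS with incremental id assignment by a depth-first traversal over an explicit LIFO stack that records (depth, path) pairs, followed by a stable sort on depth (which reconstructs breadth-first order) and a single enumeration pass assigning the ids.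
import Mathlib
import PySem

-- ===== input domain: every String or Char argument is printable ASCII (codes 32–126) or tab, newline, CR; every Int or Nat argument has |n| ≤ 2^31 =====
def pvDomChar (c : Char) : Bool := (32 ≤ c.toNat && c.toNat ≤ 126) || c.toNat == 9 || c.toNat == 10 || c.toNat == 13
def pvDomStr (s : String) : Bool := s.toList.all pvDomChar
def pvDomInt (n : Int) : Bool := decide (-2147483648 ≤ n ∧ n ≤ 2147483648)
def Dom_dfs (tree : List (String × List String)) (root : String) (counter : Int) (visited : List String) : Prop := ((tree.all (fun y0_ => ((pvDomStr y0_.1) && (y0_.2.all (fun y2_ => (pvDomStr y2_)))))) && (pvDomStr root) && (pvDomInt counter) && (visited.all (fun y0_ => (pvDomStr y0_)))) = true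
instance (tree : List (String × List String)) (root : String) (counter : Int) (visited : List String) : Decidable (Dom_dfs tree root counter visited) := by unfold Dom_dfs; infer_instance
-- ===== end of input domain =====

-- B replaces A's FIFO-queue BFS by a depth-first stack traversal recording (depth, path)
-- pairs, a stable sort by depth (recovering breadth-first order) and one enumeration pass
-- assigning the ids; equivalence is proved on all inputs where A terminates.


-- ===== PORT A =====
-- "C" + str(counter).zfill(4)
def pvTempIdA (counter : Int) : String := "C" ++ PySem.Str.zfill (PySem.Int.toStr counter) 4

-- temp2 = front.split('.'); suffix = temp2[len(temp2)-1]  (split never returns an empty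
-- list, so the index is always in range and the "" default is never used)
def pvSuffixA (front : String) : String :=
  let temp2 := ((PySem.Str.split? front ".").getD [])
  PySem.List.pyGetD temp2 ((temp2.length : Int) - 1) ""

-- the strings appended to q for front: empty when suffix not in tree.keys()
def pvChildrenA (tree : PySem.Dict String (List String)) (front : String) : List String :=
  if tree.contains (pvSuffixA front) then
    (tree.getD (pvSuffixA front) []).map (fun adj => front ++ "." ++ adj)
  else []

-- frontier after one ply (used only to compute a sufficient fuel, and by Pre_)
def pvNextA (tree : PySem.Dict String (List String)) (level : List String) : List String :=
  level.flatMap (pvChildrenA tree)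

-- total number of loop iterations within n plies: a totality fuel for the while-loop
def pvFuelA (tree : PySem.Dict String (List String)) : Nat → List String → Nat
  | 0, _ => 0
  | n + 1, level => level.length + pvFuelA tree n (pvNextA tree level)

-- the while-loop of A: pop the front, assign its id, push its children at the back
def dfsLoopA (tree : PySem.Dict String (List String)) :
    Nat → List String → PySem.Dict String String → Int → PySem.Dict String String
  | 0, _, d, _ => d
  | _ + 1, [], d, _ => d
  | fuel + 1, front :: rest, d, counter =>
      dfsLoopA tree fuel (rest ++ pvChildrenA tree front)
        (d.insert front (pvTempIdA counter)) (counter + 1)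

def dfs (tree : List (String × List String)) (root : String) (counter : Int) (visited : List String) : List (String × String) :=
  let td := PySem.Dict.ofList tree
  (dfsLoopA td (pvFuelA td (2 * tree.length + 3) [root]) [root] PySem.Dict.empty counter).items

-- ===== PORT B =====
-- suffix = path.split('.')[-1]
def pvSuffixB (path : String) : String :=
  (PySem.List.pyGet? ((PySem.Str.split? path ".").getD []) (-1)).getD ""

-- the (depth+1)-tagged children of a node (used by B's fuel computation and the proofs)
def pvKidsB (tree : PySem.Dict String (List String)) (depth : Int) (path : String) :
    List (Int × String) :=
  if tree.contains (pvSuffixB path) then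
    (tree.getD (pvSuffixB path) []).map (fun adj => (depth + 1, path ++ "." ++ adj))
  else []

def pvNextB (tree : PySem.Dict String (List String)) (s : List (Int × String)) :
    List (Int × String) :=
  s.flatMap (fun dp => pvKidsB tree dp.1 dp.2)

-- total number of stack-loop iterations within n plies: a totality fuel for B's while-loop
def pvFuelB (tree : PySem.Dict String (List String)) : Nat → List (Int × String) → Nat
  | 0, _ => 0
  | n + 1, s => s.length + pvFuelB tree n (pvNextB tree s)

-- B's while-loop: pop the TOP of the stack, record (depth, path), push the children reversed
def dfsStackB (tree : PySem.Dict String (List String)) :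
    Nat → List (Int × String) → List (Int × String) → List (Int × String)
  | 0, _, order => order
  | _ + 1, [], order => order
  | fuel + 1, (depth, path) :: rest, order =>
      dfsStackB tree fuel
        (if tree.contains (pvSuffixB path) then
            ((tree.getD (pvSuffixB path) []).reverse).foldl
              (fun st adj => (depth + 1, path ++ "." ++ adj) :: st) rest
          else rest)
        (order ++ [(depth, path)])

def dfs_alt (tree : List (String × List String)) (root : String) (counter : Int) (visited : List String) : List (String × String) :=
  let td := PySem.Dict.ofList tree
  let order := dfsStackB td (pvFuelB td (tree.length + 2) [((0 : Int), root)]) [((0 : Int), root)] []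
  let ord := PySem.List.sorted order (fun dp => dp.1)
  ((PySem.List.enumerate ord).foldl
      (fun d ip => d.insert ip.2.2 ("C" ++ PySem.Str.zfill (PySem.Int.toStr (counter + ip.1)) 4))
      PySem.Dict.empty).items

-- ===== PRECONDITION & SPEC =====
-- one ply of the reachability iteration on the deduplicated set of last-name keys
def pvKeyStep (tree : PySem.Dict String (List String)) (ks : List String) : List String :=
  PySem.Set.ofList (ks.flatMap (fun s =>
    if tree.contains s then (tree.getD s []).map pvSuffixA else []))

-- Pre_ excludes exactly the inputs on which A's queue never empties (a cycle among the
-- last-name components reachable from root), where the Python A loops forever and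
-- returns nothing: the (tree.length + 1)-fold image of the root's last component under
-- the one-ply reachability map on last-name keys must be empty (by pigeonhole this is
-- exactly acyclicity of the reachable part of the key graph, i.e. termination of A).
def Pre_dfs (tree : List (String × List String)) (root : String) (counter : Int) (visited : List String) : Prop :=
  (pvKeyStep (PySem.Dict.ofList tree))^[tree.length + 1] [pvSuffixA root] = []
instance (tree : List (String × List String)) (root : String) (counter : Int) (visited : List String) : Decidable (Pre_dfs tree root counter visited) := by unfold Pre_dfs; infer_instance

def pvWitness_dfs : (List (String × List String)) × String × Int × List String :=
  ([("a", ["b", "c"]), ("b", ["d"])], "a", 7, [])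

def Spec_dfs (tree : List (String × List String)) (root : String) (counter : Int) (visited : List String) (out : List (String × String)) : Prop := out = dfs_alt tree root counter visited
instance (tree : List (String × List String)) (root : String) (counter : Int) (visited : List String) (out : List (String × String)) : Decidable (Spec_dfs tree root counter visited out) := by unfold Spec_dfs; infer_instance

-- ===== CLAIM (what is proved, stated in full; the proofs are below) =====
def Claim_equal_dfs : Prop := ∀ (tree : List (String × List String)) (root : String) (counter : Int) (visited : List String), Dom_dfs tree root counter visited → Pre_dfs tree root counter visited → Spec_dfs tree root counter visited (dfs tree root counter visited)

-- ===== LEMMAS AND PROOFS =====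

-- the step of assigning one node its id (A's loop body on the (dict, counter) pair)
def pvStep (p : PySem.Dict String String × Int) (fr : String) :
    PySem.Dict String String × Int :=
  (p.1.insert fr (pvTempIdA p.2), p.2 + 1)

-- A's index temp2[len(temp2)-1] and B's temp2[-1] pick the same element
theorem pv_last_eq (xs : List String) :
    (PySem.List.pyGet? xs (-1)).getD "" = PySem.List.pyGetD xs ((xs.length : Int) - 1) "" := by
  cases xs with
  | nil => rfl
  | cons a l =>
      rw [PySem.List.pyGet?_neg_one,
        PySem.List.pyGetD_eq_getElem (h0 := by simp) (h1 := by simp)]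
      rw [List.getLast?_eq_getElem?]
      simp
      rfl

theorem pv_suffix_eq (front : String) : pvSuffixB front = pvSuffixA front := by
  unfold pvSuffixB pvSuffixA
  exact pv_last_eq _

-- B's children are A's children tagged with depth + 1
theorem pv_kids_eq (tree : PySem.Dict String (List String)) (d : Int) (p : String) :
    pvKidsB tree d p = (pvChildrenA tree p).map (fun q => (d + 1, q)) := by
  unfold pvKidsB pvChildrenA
  rw [pv_suffix_eq]
  by_cases h : tree.contains (pvSuffixA p) = true <;> simp [h]

-- every child of (d, p) carries depth d + 1
theorem pv_kids_depth (tree : PySem.Dict String (List String)) (d : Int) (p : String)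
    (c : Int × String) (hc : c ∈ pvKidsB tree d p) : c.1 = d + 1 := by
  rw [pv_kids_eq] at hc
  rw [List.mem_map] at hc
  obtain ⟨q, _, h⟩ := hc
  rw [← h]

-- pushing a reversed list one element at a time = prepending the mapped list
theorem pv_push_eq {α β : Type} (xs : List α) (f : α → β) (rest : List β) :
    (xs.reverse).foldl (fun st x => f x :: st) rest = xs.map f ++ rest := by
  induction xs generalizing rest with
  | nil => rfl
  | cons a t ih =>
      simp only [List.reverse_cons, List.foldl_append, List.foldl_cons, List.foldl_nil,
        List.map_cons, List.cons_append]
      rw [ih]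

-- the accumulator-free skeleton of B's stack loop
def pvPre (tree : PySem.Dict String (List String)) :
    Nat → List (Int × String) → List (Int × String)
  | 0, _ => []
  | _ + 1, [] => []
  | fuel + 1, x :: rest => x :: pvPre tree fuel (pvKidsB tree x.1 x.2 ++ rest)

theorem pv_stack_eq (tree : PySem.Dict String (List String)) :
    ∀ (f : Nat) (s order : List (Int × String)),
      dfsStackB tree f s order = order ++ pvPre tree f s := by
  intro f
  induction f with
  | zero => intro s order; simp [dfsStackB, pvPre]
  | succ f ih =>
      intro s order
      cases s with
      | nil => simp [dfsStackB, pvPre]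
      | cons x rest =>
          obtain ⟨d, p⟩ := x
          rw [dfsStackB]
          have hst : (if tree.contains (pvSuffixB p) then
              ((tree.getD (pvSuffixB p) []).reverse).foldl
                (fun st adj => (d + 1, p ++ "." ++ adj) :: st) rest
            else rest) = pvKidsB tree d p ++ rest := by
            unfold pvKidsB
            by_cases h : tree.contains (pvSuffixB p) = true
            · simp only [h, if_true]
              exact pv_push_eq _ _ _
            · simp [h]
          rw [hst, ih]
          simp [pvPre]

-- one-ply frontier map: algebraic facts
theorem pv_nextB_append (tree : PySem.Dict String (List String)) (a b : List (Int × String)) :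
    pvNextB tree (a ++ b) = pvNextB tree a ++ pvNextB tree b := by
  simp [pvNextB]

theorem pv_nextB_nil (tree : PySem.Dict String (List String)) : pvNextB tree [] = [] := rfl

theorem pv_nextB_single (tree : PySem.Dict String (List String)) (x : Int × String) :
    pvNextB tree [x] = pvKidsB tree x.1 x.2 := by simp [pvNextB]

theorem pv_iterB_append (tree : PySem.Dict String (List String)) (j : Nat) :
    ∀ a b, (pvNextB tree)^[j] (a ++ b) = (pvNextB tree)^[j] a ++ (pvNextB tree)^[j] b := by
  induction j with
  | zero => intro a b; rfl
  | succ j ih =>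
      intro a b
      rw [Function.iterate_succ_apply, Function.iterate_succ_apply,
        Function.iterate_succ_apply, pv_nextB_append, ih]

theorem pv_iterB_nil (tree : PySem.Dict String (List String)) (j : Nat) :
    (pvNextB tree)^[j] [] = [] := by
  induction j with
  | zero => rfl
  | succ j ih => rw [Function.iterate_succ_apply, pv_nextB_nil, ih]

theorem pv_iterB_flat (tree : PySem.Dict String (List String)) (j : Nat) :
    ∀ s : List (Int × String),
      (pvNextB tree)^[j] s = s.flatMap (fun x => (pvNextB tree)^[j] [x]) := by
  intro s
  induction s with
  | nil => simp [pv_iterB_nil]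
  | cons x t ih =>
      have h : x :: t = [x] ++ t := rfl
      rw [h, pv_iterB_append, ih]
      simp

theorem pv_fuelB_nil (tree : PySem.Dict String (List String)) (n : Nat) :
    pvFuelB tree n [] = 0 := by
  induction n with
  | zero => rfl
  | succ n ih => simp [pvFuelB, pv_nextB_nil, ih]

theorem pv_fuelB_append (tree : PySem.Dict String (List String)) (n : Nat) :
    ∀ a b, pvFuelB tree n (a ++ b) = pvFuelB tree n a + pvFuelB tree n b := by
  induction n with
  | zero => intro a b; rfl
  | succ n ih =>
      intro a b
      simp only [pvFuelB, pv_nextB_append, ih, List.length_append]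
      omega

theorem pv_fuelB_stab (tree : PySem.Dict String (List String)) :
    ∀ (n k : Nat) (s : List (Int × String)), (pvNextB tree)^[n] s = [] →
      pvFuelB tree (n + k) s = pvFuelB tree n s := by
  intro n
  induction n with
  | zero =>
      intro k s h
      simp only [Function.iterate_zero_apply] at h
      subst h
      rw [pv_fuelB_nil, pv_fuelB_nil]
  | succ n ih =>
      intro k s h
      have h' : (pvNextB tree)^[n] (pvNextB tree s) = [] := by
        rwa [← Function.iterate_succ_apply]
      have harith : n + 1 + k = (n + k) + 1 := by omega
      rw [harith]
      simp only [pvFuelB]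
      rw [ih k _ h']

-- the per-node preorder list, with ply fuel
def pvPreN (tree : PySem.Dict String (List String)) :
    Nat → (Int × String) → List (Int × String)
  | 0, x => [x]
  | n + 1, x => x :: (pvKidsB tree x.1 x.2).flatMap (pvPreN tree n)

theorem pv_preN_stab (tree : PySem.Dict String (List String)) :
    ∀ (n k : Nat) (x : Int × String), (pvNextB tree)^[n + 1] [x] = [] →
      pvPreN tree (n + k) x = pvPreN tree n x := by
  intro n
  induction n with
  | zero =>
      intro k x h
      have hk : pvKidsB tree x.1 x.2 = [] := by
        rwa [Function.iterate_succ_apply, pv_nextB_single, Function.iterate_zero_apply] at h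
      cases k with
      | zero => rfl
      | succ k => simp [pvPreN, hk]
  | succ n ih =>
      intro k x h
      have hkids : (pvNextB tree)^[n + 1] (pvKidsB tree x.1 x.2) = [] := by
        rwa [Function.iterate_succ_apply (f := pvNextB tree) (n := n + 1), pv_nextB_single] at h
      have hchild : ∀ c ∈ pvKidsB tree x.1 x.2, (pvNextB tree)^[n + 1] [c] = [] := by
        intro c hc
        have hflat := pv_iterB_flat tree (n + 1) (pvKidsB tree x.1 x.2)
        rw [hkids] at hflat
        exact (List.flatMap_eq_nil_iff).mp hflat.symm c hc
      have harith : n + 1 + k = (n + k) + 1 := by omega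
      rw [harith]
      simp only [pvPreN]
      congr 1
      apply List.flatMap_congr
      intro c hc
      exact ih k c (hchild c hc)

-- adequate fuel: B's stack loop computes the concatenated per-node preorders
theorem pv_pre_eq_preN (tree : PySem.Dict String (List String)) :
    ∀ (f n : Nat) (s : List (Int × String)), (pvNextB tree)^[n + 1] s = [] →
      pvFuelB tree (n + 1) s ≤ f →
      pvPre tree f s = s.flatMap (pvPreN tree n) := by
  intro f
  induction f with
  | zero =>
      intro n s hdead hfuel
      cases s with
      | nil => simp [pvPre]
      | cons x rest => simp [pvFuelB] at hfuel
  | succ f ih =>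
      intro n s hdead hfuel
      cases s with
      | nil => simp [pvPre]
      | cons x rest =>
          have hsplit : (pvNextB tree)^[n + 1] ([x] ++ rest) = [] := hdead
          rw [pv_iterB_append] at hsplit
          have hx : (pvNextB tree)^[n + 1] [x] = [] :=
            (List.append_eq_nil_iff.mp hsplit).1
          have hrest : (pvNextB tree)^[n + 1] rest = [] :=
            (List.append_eq_nil_iff.mp hsplit).2
          have hkids : (pvNextB tree)^[n] (pvKidsB tree x.1 x.2) = [] := by
            rwa [Function.iterate_succ_apply, pv_nextB_single] at hx
          have hkids1 : (pvNextB tree)^[n + 1] (pvKidsB tree x.1 x.2) = [] := by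
            rw [Function.iterate_succ_apply', hkids, pv_nextB_nil]
          have hdead' : (pvNextB tree)^[n + 1] (pvKidsB tree x.1 x.2 ++ rest) = [] := by
            rw [pv_iterB_append, hkids1, hrest]; rfl
          have hfuel' : pvFuelB tree (n + 1) (pvKidsB tree x.1 x.2 ++ rest) ≤ f := by
            have e1 : pvFuelB tree (n + 1) (x :: rest)
                = pvFuelB tree (n + 1) [x] + pvFuelB tree (n + 1) rest := by
              have h : (x :: rest : List (Int × String)) = [x] ++ rest := rfl
              rw [h, pv_fuelB_append]
            have e2 : pvFuelB tree (n + 1) [x] = 1 + pvFuelB tree n (pvKidsB tree x.1 x.2) := by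
              simp [pvFuelB, pv_nextB_single]
            have e3 : pvFuelB tree (n + 1) (pvKidsB tree x.1 x.2)
                = pvFuelB tree n (pvKidsB tree x.1 x.2) :=
              pv_fuelB_stab tree n 1 _ hkids
            rw [pv_fuelB_append, e3]
            rw [e1, e2] at hfuel
            omega
          show x :: pvPre tree f (pvKidsB tree x.1 x.2 ++ rest) = _
          rw [ih n _ hdead' hfuel', List.flatMap_append]
          cases n with
          | zero =>
              have hk : pvKidsB tree x.1 x.2 = [] := by simpa using hkids
              simp [hk, pvPreN]
          | succ m =>
              have hchild : ∀ c ∈ pvKidsB tree x.1 x.2, (pvNextB tree)^[m + 1] [c] = [] := by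
                intro c hc
                have hflat := pv_iterB_flat tree (m + 1) (pvKidsB tree x.1 x.2)
                rw [hkids] at hflat
                exact (List.flatMap_eq_nil_iff).mp hflat.symm c hc
              have hcongr : (pvKidsB tree x.1 x.2).flatMap (pvPreN tree (m + 1))
                  = (pvKidsB tree x.1 x.2).flatMap (pvPreN tree m) := by
                apply List.flatMap_congr
                intro c hc
                have h := pv_preN_stab tree m 1 c (hchild c hc)
                simpa using h
              rw [hcongr]
              simp [pvPreN]

-- depth bounds of the preorder list
theorem pv_preN_bound (tree : PySem.Dict String (List String)) :
    ∀ (n : Nat) (x dp : Int × String), dp ∈ pvPreN tree n x →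
      x.1 ≤ dp.1 ∧ dp.1 ≤ x.1 + n := by
  intro n
  induction n with
  | zero =>
      intro x dp h
      simp only [pvPreN, List.mem_singleton] at h
      subst h
      omega
  | succ n ih =>
      intro x dp h
      simp only [pvPreN, List.mem_cons, List.mem_flatMap] at h
      rcases h with h | ⟨c, hc, hdp⟩
      · subst h; omega
      · have hcd : c.1 = x.1 + 1 := pv_kids_depth tree x.1 x.2 c hc
        have := ih c dp hdp
        push_cast
        omega

-- the depth-j slice of the preorder list is the j-th frontier
theorem pv_preN_filter (tree : PySem.Dict String (List String)) :
    ∀ (n : Nat) (x : Int × String) (j : Nat), j ≤ n →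
      (pvPreN tree n x).filter (fun dp => dp.1 == x.1 + (j : Int))
        = (pvNextB tree)^[j] [x] := by
  intro n
  induction n with
  | zero =>
      intro x j hj
      interval_cases j
      simp [pvPreN]
  | succ n ih =>
      intro x j hj
      cases j with
      | zero =>
          simp only [pvPreN, List.filter_cons]
          have hx : (x.1 == x.1 + ((0 : Nat) : Int)) = true := by simp
          rw [if_pos hx]
          have hrest : ((pvKidsB tree x.1 x.2).flatMap (pvPreN tree n)).filter
              (fun dp => dp.1 == x.1 + ((0 : Nat) : Int)) = [] := by
            rw [List.filter_eq_nil_iff]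
            intro dp hdp
            rw [List.mem_flatMap] at hdp
            obtain ⟨c, hc, hdp⟩ := hdp
            have hcd := pv_kids_depth tree x.1 x.2 c hc
            have hb := pv_preN_bound tree n c dp hdp
            simp only [beq_iff_eq]
            push_cast
            omega
          rw [hrest]
          simp
      | succ j =>
          simp only [pvPreN, List.filter_cons]
          have hx : (x.1 == x.1 + ((j + 1 : Nat) : Int)) = false := by
            simp only [beq_eq_false_iff_ne, ne_eq]
            push_cast
            omega
          rw [if_neg (by simp; omega)]
          rw [List.filter_flatMap]
          have hcong : ∀ c ∈ pvKidsB tree x.1 x.2,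
              (pvPreN tree n c).filter (fun dp => dp.1 == x.1 + ((j + 1 : Nat) : Int))
                = (pvNextB tree)^[j] [c] := by
            intro c hc
            have hcd : c.1 = x.1 + 1 := pv_kids_depth tree x.1 x.2 c hc
            have heq : (fun dp : Int × String => dp.1 == x.1 + ((j + 1 : Nat) : Int))
                = (fun dp : Int × String => dp.1 == c.1 + (j : Int)) := by
              funext dp
              rw [hcd]
              have : x.1 + ((j + 1 : Nat) : Int) = x.1 + 1 + (j : Int) := by push_cast; ring
              rw [this]
            rw [heq]
            exact ih c j (by omega)
          rw [List.flatMap_congr hcong, ← pv_iterB_flat,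
            Function.iterate_succ_apply, pv_nextB_single]

-- insertBy passes over elements it is not `before`
theorem pv_insertBy_skip {α : Type} (before : α → α → Bool) (x : α) :
    ∀ (u v : List α), (∀ y ∈ u, before x y = false) →
      PySem.List.insertBy before x (u ++ v) = u ++ PySem.List.insertBy before x v := by
  intro u
  induction u with
  | nil => intro v _; rfl
  | cons y t ih =>
      intro v h
      have hy : before x y = false := h y (by simp)
      simp only [List.cons_append, PySem.List.insertBy, hy]
      rw [ih v (fun z hz => h z (by simp [hz]))]
      simp

theorem pv_insertBy_front {α : Type} (before : α → α → Bool) (x : α)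
    (v : List α) (h : ∀ y ∈ v, before x y = true) :
    PySem.List.insertBy before x v = x :: v := by
  cases v with
  | nil => rfl
  | cons y t =>
      have hy : before x y = true := h y (by simp)
      simp [PySem.List.insertBy, hy]

-- counting sort: a stable sort by an Int key with values in [0, N) is the bucket concatenation
theorem pv_counting_sort (N : Nat) :
    ∀ (xs : List (Int × String)), (∀ dp ∈ xs, 0 ≤ dp.1 ∧ dp.1 < (N : Int)) →
      PySem.List.sorted xs (fun dp => dp.1)
        = (List.range N).flatMap (fun (k : Nat) => xs.filter (fun dp => dp.1 == ((k : Nat) : Int))) := by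
  intro xs
  induction xs using List.reverseRecOn with
  | nil => intro _; simp [PySem.List.sorted_eq_foldl_insertBy]
  | append_singleton xs x ih =>
      intro hb
      have hbxs : ∀ dp ∈ xs, 0 ≤ dp.1 ∧ dp.1 < (N : Int) := by
        intro dp hdp; exact hb dp (by simp [hdp])
      obtain ⟨h0, hN⟩ := hb x (by simp)
      rw [PySem.List.sorted_eq_foldl_insertBy, List.foldl_append, List.foldl_cons, List.foldl_nil,
        ← PySem.List.sorted_eq_foldl_insertBy, ih hbxs]
      set before := fun a b : Int × String => decide (a.1 < b.1) with hbef
      set k0 : Nat := x.1.toNat with hk0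
      have hx1 : x.1 = (k0 : Int) := by omega
      have hk0N : k0 < N := by omega
      have hNsplit : N = (k0 + 1) + (N - k0 - 1) := by omega
      have hfxne : ∀ k : Nat, k ≠ k0 → ([x].filter (fun dp => dp.1 == ((k : Nat) : Int))) = [] := by
        intro k hk
        have h : ((x.1 == ((k : Nat) : Int))) = false := by
          rw [hx1]
          simp only [beq_eq_false_iff_ne, ne_eq, Nat.cast_inj]
          omega
        simp [h]
      have hfxeq : ([x].filter (fun dp => dp.1 == ((k0 : Nat) : Int))) = [x] := by
        have h : ((x.1 == ((k0 : Nat) : Int))) = true := by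
          rw [hx1]; simp
        simp [h]
      have hLHS : (List.range N).flatMap (fun (k : Nat) => xs.filter (fun dp => dp.1 == ((k : Nat) : Int)))
          = (List.range (k0 + 1)).flatMap (fun (k : Nat) => xs.filter (fun dp => dp.1 == ((k : Nat) : Int)))
            ++ ((List.range (N - k0 - 1)).map (fun i => k0 + 1 + i)).flatMap
                (fun (k : Nat) => xs.filter (fun dp => dp.1 == ((k : Nat) : Int))) := by
        conv_lhs => rw [hNsplit]
        rw [List.range_add, List.flatMap_append]
      have hRHS : (List.range N).flatMap (fun (k : Nat) => (xs ++ [x]).filter (fun dp => dp.1 == ((k : Nat) : Int)))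
          = ((List.range (k0 + 1)).flatMap (fun (k : Nat) => xs.filter (fun dp => dp.1 == ((k : Nat) : Int))) ++ [x])
            ++ ((List.range (N - k0 - 1)).map (fun i => k0 + 1 + i)).flatMap
                (fun (k : Nat) => xs.filter (fun dp => dp.1 == ((k : Nat) : Int))) := by
        conv_lhs => rw [hNsplit]
        rw [List.range_add, List.flatMap_append]
        congr 1
        · -- front buckets
          rw [List.range_succ, List.flatMap_append, List.flatMap_append]
          have h1 : (List.range k0).flatMap
                (fun (k : Nat) => (xs ++ [x]).filter (fun dp => dp.1 == ((k : Nat) : Int)))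
              = (List.range k0).flatMap (fun (k : Nat) => xs.filter (fun dp => dp.1 == ((k : Nat) : Int))) := by
            apply List.flatMap_congr
            intro k hk
            rw [List.mem_range] at hk
            rw [List.filter_append, hfxne k (by omega), List.append_nil]
          have h2 : ([k0] : List Nat).flatMap
                (fun (k : Nat) => (xs ++ [x]).filter (fun dp => dp.1 == ((k : Nat) : Int)))
              = ([k0] : List Nat).flatMap (fun (k : Nat) => xs.filter (fun dp => dp.1 == ((k : Nat) : Int))) ++ [x] := by
            simp only [List.flatMap_cons, List.flatMap_nil, List.append_nil]
            rw [List.filter_append, hfxeq]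
          rw [h1, h2, List.append_assoc]
        · -- tail buckets
          apply List.flatMap_congr
          intro k hk
          rw [List.mem_map] at hk
          obtain ⟨i, _, hik⟩ := hk
          rw [List.filter_append, hfxne k (by omega), List.append_nil]
      rw [hLHS, hRHS]
      have hUk : ∀ y ∈ (List.range (k0 + 1)).flatMap
          (fun (k : Nat) => xs.filter (fun dp => dp.1 == ((k : Nat) : Int))), before x y = false := by
        intro y hy
        rw [List.mem_flatMap] at hy
        obtain ⟨k, hk, hyf⟩ := hy
        rw [List.mem_range] at hk
        have hmem := List.of_mem_filter hyf
        simp only [beq_iff_eq] at hmem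
        simp only [hbef, decide_eq_false_iff_not, not_lt, hx1, hmem]
        exact_mod_cast by omega
      have hVk : ∀ y ∈ ((List.range (N - k0 - 1)).map (fun i => k0 + 1 + i)).flatMap
          (fun (k : Nat) => xs.filter (fun dp => dp.1 == ((k : Nat) : Int))), before x y = true := by
        intro y hy
        rw [List.mem_flatMap] at hy
        obtain ⟨k, hk, hyf⟩ := hy
        rw [List.mem_map] at hk
        obtain ⟨i, _, hik⟩ := hk
        have hmem := List.of_mem_filter hyf
        simp only [beq_iff_eq] at hmem
        simp only [hbef, decide_eq_true_eq, hx1, hmem, ← hik]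
        exact_mod_cast by omega
      rw [pv_insertBy_skip before x _ _ hUk, pv_insertBy_front before x _ hVk]
      simp

-- ===== the precondition kills A's path frontier =====

-- a total single-'.'-separator splitter: (first piece, remaining pieces)
def pvSplitC : List Char → List Char × List (List Char)
  | [] => ([], [])
  | c :: t =>
      let r := pvSplitC t
      if c = '.' then ([], r.1 :: r.2) else (c :: r.1, r.2)

theorem pv_go_eq :
    ∀ (fuel : Nat) (l cur : List Char) (acc : List (List Char)), l.length < fuel →
      PySem.Chars.splitOn.go ['.'] fuel l cur acc
        = acc.reverse ++ (cur.reverse ++ (pvSplitC l).1) :: (pvSplitC l).2 := by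
  intro fuel
  induction fuel with
  | zero => intro l cur acc h; omega
  | succ fuel ih =>
      intro l cur acc h
      cases l with
      | nil => simp [PySem.Chars.splitOn.go, pvSplitC]
      | cons c rest =>
          by_cases hc : c = '.'
          · subst hc
            have hpre : List.isPrefixOf ['.'] ('.' :: rest) = true := by
              simp [List.isPrefixOf]
            rw [show PySem.Chars.splitOn.go ['.'] (fuel + 1) ('.' :: rest) cur acc
                = PySem.Chars.splitOn.go ['.'] fuel (List.drop (['.'] : List Char).length ('.' :: rest)) [] (cur.reverse :: acc) by
              simp [PySem.Chars.splitOn.go, hpre]]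
            rw [show List.drop (['.'] : List Char).length ('.' :: rest) = rest by simp]
            rw [ih rest [] (cur.reverse :: acc) (by simp at h ⊢; omega)]
            simp [pvSplitC]
          · have hpre : List.isPrefixOf ['.'] (c :: rest) = false := by
              simp [List.isPrefixOf]
              exact fun hh => hc hh.symm
            rw [show PySem.Chars.splitOn.go ['.'] (fuel + 1) (c :: rest) cur acc
                = PySem.Chars.splitOn.go ['.'] fuel rest (c :: cur) acc by
              simp [PySem.Chars.splitOn.go, hpre]]
            rw [ih rest (c :: cur) acc (by simp at h ⊢; omega)]
            simp [pvSplitC, hc]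

theorem pv_splitOn_eq (l : List Char) :
    PySem.Chars.splitOn l ['.'] = (pvSplitC l).1 :: (pvSplitC l).2 := by
  unfold PySem.Chars.splitOn
  rw [pv_go_eq (l.length + 1) l [] [] (by omega)]
  simp

theorem pv_splitC_append (a b : List Char) :
    pvSplitC (a ++ '.' :: b)
      = ((pvSplitC a).1, (pvSplitC a).2 ++ (pvSplitC b).1 :: (pvSplitC b).2) := by
  induction a with
  | nil => simp [pvSplitC]
  | cons c t ih =>
      by_cases hc : c = '.'
      · subst hc
        simp [pvSplitC, ih]
      · simp [pvSplitC, hc, ih]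

theorem pv_lastD (xs : List String) :
    PySem.List.pyGetD xs ((xs.length : Int) - 1) "" = (xs.getLast?).getD "" := by
  cases xs with
  | nil => rfl
  | cons a l =>
      rw [PySem.List.pyGetD_eq_getElem (h0 := by simp) (h1 := by simp)]
      rw [List.getLast?_eq_getElem?]
      simp
      rfl

-- the last '.'-component of front + "." + adj is that of adj
theorem pv_suffix_append (p adj : String) :
    pvSuffixA (p ++ "." ++ adj) = pvSuffixA adj := by
  have hsplit : ∀ s : String, (PySem.Str.split? s ".").getD []
      = ((pvSplitC s.toList).1 :: (pvSplitC s.toList).2).map String.ofList := by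
    intro s
    have h1 : PySem.Str.split? s "." = Option.map (fun x => List.map String.ofList x)
        (PySem.Chars.split? s.toList ".".toList) := rfl
    have h2 : ".".toList = ['.'] := by decide
    rw [h1, h2]
    rw [show PySem.Chars.split? s.toList ['.'] = some (PySem.Chars.splitOn s.toList ['.']) from rfl]
    rw [pv_splitOn_eq]
    rfl
  have htl : (p ++ "." ++ adj).toList = p.toList ++ '.' :: adj.toList := by
    rw [String.toList_append, String.toList_append]
    rw [show ".".toList = ['.'] by decide]
    simp
  unfold pvSuffixA
  simp only []
  rw [pv_lastD, pv_lastD, hsplit, hsplit, htl, pv_splitC_append]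
  rw [show ((pvSplitC p.toList).1 ::
        ((pvSplitC p.toList).2 ++ (pvSplitC adj.toList).1 :: (pvSplitC adj.toList).2)).map String.ofList
      = ((pvSplitC p.toList).1 :: (pvSplitC p.toList).2).map String.ofList
        ++ ((pvSplitC adj.toList).1 :: (pvSplitC adj.toList).2).map String.ofList by
    simp]
  rw [List.getLast?_append]
  obtain ⟨v, hv⟩ := Option.isSome_iff_exists.mp
    ((List.getLast?_isSome
        (l := List.map String.ofList ((pvSplitC adj.toList).1 :: (pvSplitC adj.toList).2))).mpr
      (by simp))
  rw [hv, Option.some_or]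

-- membership in A's child list
theorem pv_childrenA_mem (tree : PySem.Dict String (List String)) (p q : String)
    (hq : q ∈ pvChildrenA tree p) :
    tree.contains (pvSuffixA p) = true
      ∧ ∃ adj ∈ tree.getD (pvSuffixA p) [], q = p ++ "." ++ adj := by
  unfold pvChildrenA at hq
  by_cases h : tree.contains (pvSuffixA p) = true
  · rw [if_pos h] at hq
    rw [List.mem_map] at hq
    obtain ⟨adj, hadj, hqe⟩ := hq
    exact ⟨h, adj, hadj, hqe.symm⟩
  · rw [if_neg h] at hq
    simp at hq

-- the suffixes of A's path frontier stay inside the key-set iteration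
theorem pv_reach (tree : PySem.Dict String (List String)) :
    ∀ (k : Nat) (P K : List String), (∀ p ∈ P, pvSuffixA p ∈ K) →
      ∀ q ∈ (pvNextA tree)^[k] P, pvSuffixA q ∈ (pvKeyStep tree)^[k] K := by
  intro k
  induction k with
  | zero => intro P K h q hq; exact h q hq
  | succ k ih =>
      intro P K h q hq
      rw [Function.iterate_succ_apply] at hq ⊢
      refine ih (pvNextA tree P) (pvKeyStep tree K) ?_ q hq
      intro r hr
      unfold pvNextA at hr
      rw [List.mem_flatMap] at hr
      obtain ⟨p, hp, hrc⟩ := hr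
      obtain ⟨hcont, adj, hadj, hre⟩ := pv_childrenA_mem tree p r hrc
      unfold pvKeyStep
      rw [PySem.Set.mem_ofList, List.mem_flatMap]
      refine ⟨pvSuffixA p, h p hp, ?_⟩
      rw [if_pos hcont, List.mem_map]
      exact ⟨adj, hadj, by rw [hre, pv_suffix_append]⟩

-- ===== A-side characterisation =====

-- A's queue processes a level en bloc
theorem pv_L1 (tree : PySem.Dict String (List String)) (level : List String) :
    ∀ (acc : List String) (f : Nat) (d : PySem.Dict String String) (c : Int),
    dfsLoopA tree (f + level.length) (level ++ acc) d c
      = dfsLoopA tree f (acc ++ pvNextA tree level)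
          (level.foldl pvStep (d, c)).1 (level.foldl pvStep (d, c)).2 := by
  induction level with
  | nil => intro acc f d c; simp [pvNextA]
  | cons front rest ih =>
      intro acc f d c
      have hf : f + (front :: rest).length = (f + rest.length) + 1 := by
        simp [List.length_cons]; omega
      rw [hf]
      show dfsLoopA tree (f + rest.length) ((rest ++ acc) ++ pvChildrenA tree front) _ _ = _
      rw [List.append_assoc]
      rw [ih (acc ++ pvChildrenA tree front) f (d.insert front (pvTempIdA c)) (c + 1)]
      simp [pvNextA, pvStep]

-- the concatenation of the first m levels
def pvCat (tree : PySem.Dict String (List String)) : Nat → List String → List String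
  | 0, _ => []
  | m + 1, lv => lv ++ pvCat tree m (pvNextA tree lv)

-- A's loop with the m-ply fuel folds pvStep over the first m levels
theorem pv_A_cat (tree : PySem.Dict String (List String)) :
    ∀ (m : Nat) (lv : List String) (d : PySem.Dict String String) (c : Int),
      dfsLoopA tree (pvFuelA tree m lv) lv d c
        = ((pvCat tree m lv).foldl pvStep (d, c)).1 := by
  intro m
  induction m with
  | zero => intro lv d c; cases lv <;> rfl
  | succ m ih =>
      intro lv d c
      have h1 : pvFuelA tree (m + 1) lv = pvFuelA tree m (pvNextA tree lv) + lv.length := by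
        simp [pvFuelA]; omega
      rw [h1]
      have h2 := pv_L1 tree lv [] (pvFuelA tree m (pvNextA tree lv)) d c
      simp only [List.append_nil, List.nil_append] at h2
      rw [h2, ih]
      show _ = ((lv ++ pvCat tree m (pvNextA tree lv)).foldl pvStep (d, c)).1
      rw [List.foldl_append]

theorem pv_cat_range (tree : PySem.Dict String (List String)) :
    ∀ (m : Nat) (lv : List String),
      pvCat tree m lv = (List.range m).flatMap (fun k => (pvNextA tree)^[k] lv) := by
  intro m
  induction m with
  | zero => intro lv; simp [pvCat]
  | succ m ih =>
      intro lv
      rw [List.range_succ_eq_map]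
      simp only [List.flatMap_cons, Function.iterate_zero_apply]
      show pvCat tree (m + 1) lv = lv ++ _
      simp only [pvCat]
      congr 1
      rw [ih (pvNextA tree lv)]
      rw [List.flatMap_map]
      apply List.flatMap_congr
      intro k _
      rw [Function.iterate_succ_apply]

theorem pv_iterA_dead (tree : PySem.Dict String (List String)) (n : Nat) (lv : List String)
    (h : (pvNextA tree)^[n] lv = []) :
    ∀ j, (pvNextA tree)^[n + j] lv = [] := by
  intro j
  induction j with
  | zero => simpa using h
  | succ j ih =>
      have : n + (j + 1) = (n + j) + 1 := by omega
      rw [this, Function.iterate_succ_apply', ih]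
      rfl

-- a flatMap over a longer range adds nothing once the levels are dead
theorem pv_range_trunc {α : Type} (g : Nat → List α) (n M : Nat) (hnM : n ≤ M)
    (hg : ∀ k, n ≤ k → g k = []) :
    (List.range M).flatMap g = (List.range n).flatMap g := by
  have hM : M = n + (M - n) := by omega
  rw [hM, List.range_add, List.flatMap_append]
  have h : ((List.range (M - n)).map (fun i => n + i)).flatMap g = [] := by
    rw [List.flatMap_eq_nil_iff]
    intro k hk
    rw [List.mem_map] at hk
    obtain ⟨i, _, hik⟩ := hk
    exact hg k (by omega)
  rw [h, List.append_nil]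

-- pair levels project to string levels
theorem pv_pairlevels (tree : PySem.Dict String (List String)) :
    ∀ (k : Nat) (d : Int) (lv : List String),
      (pvNextB tree)^[k] (lv.map (fun p => (d, p)))
        = ((pvNextA tree)^[k] lv).map (fun p => (d + (k : Int), p)) := by
  intro k
  induction k with
  | zero => intro d lv; simp
  | succ k ih =>
      intro d lv
      rw [Function.iterate_succ_apply]
      have h1 : pvNextB tree (lv.map (fun p => (d, p)))
          = (pvNextA tree lv).map (fun p => (d + 1, p)) := by
        simp only [pvNextB, pvNextA, List.flatMap_map]
        rw [List.map_flatMap]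
        apply List.flatMap_congr
        intro p _
        rw [pv_kids_eq]
      rw [h1, ih (d + 1) (pvNextA tree lv), ← Function.iterate_succ_apply]
      apply List.map_congr_left
      intro p _
      have : d + 1 + (k : Int) = d + ((k + 1 : Nat) : Int) := by push_cast; ring
      rw [this]

-- the enumeration pass of B is A's counter-threading fold
theorem pv_enum_fold (S : List (Int × String)) :
    ∀ (d : PySem.Dict String String) (c s0 : Int),
      (PySem.List.enumerate S s0).foldl
          (fun d ip => d.insert ip.2.2 ("C" ++ PySem.Str.zfill (PySem.Int.toStr (c + ip.1)) 4)) d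
        = ((S.map (fun dp => dp.2)).foldl pvStep (d, c + s0)).1 := by
  induction S with
  | nil => intro d c s0; simp [PySem.List.enumerate]
  | cons x t ih =>
      intro d c s0
      show ((PySem.List.enumerate (x :: t) s0).foldl _ d) = _
      rw [show PySem.List.enumerate (x :: t) s0 = (s0, x) :: PySem.List.enumerate t (s0 + 1)
        from rfl]
      rw [List.foldl_cons, List.map_cons, List.foldl_cons]
      have h := ih (d.insert x.2 ("C" ++ PySem.Str.zfill (PySem.Int.toStr (c + s0)) 4)) c (s0 + 1)
      rw [h]
      show _ = ((t.map (fun dp => dp.2)).foldl pvStep (pvStep (d, c + s0) x.2)).1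
      have hps : pvStep (d, c + s0) x.2
          = (d.insert x.2 ("C" ++ PySem.Str.zfill (PySem.Int.toStr (c + s0)) 4), c + (s0 + 1)) := by
        simp [pvStep, pvTempIdA, add_assoc]
      rw [hps]

-- ===== VERDICT (by name: the statement is the Claim_ definition above) =====
theorem dfs_spec : Claim_equal_dfs := by
  unfold Claim_equal_dfs
  intro tree root counter visited _ hpre
  unfold Spec_dfs
  unfold Pre_dfs at hpre
  simp only [dfs, dfs_alt]
  set td := PySem.Dict.ofList tree with htd
  set N : Nat := tree.length + 1 with hN
  have hpre' : (pvNextA td)^[N] [root] = [] := by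
    rw [List.eq_nil_iff_forall_not_mem]
    intro q hq
    have hmem := pv_reach td N [root] [pvSuffixA root]
      (by intro p hp; rw [List.mem_singleton] at hp; subst hp; exact List.mem_singleton.mpr rfl)
      q hq
    rw [hpre] at hmem
    exact List.not_mem_nil hmem
  -- A side
  rw [pv_A_cat, pv_cat_range]
  have hdeadA : ∀ k, N ≤ k → (pvNextA td)^[k] [root] = [] := by
    intro k hk
    have h := pv_iterA_dead td N [root] hpre' (k - N)
    have : N + (k - N) = k := by omega
    rwa [this] at h
  have hSA : (List.range (2 * tree.length + 3)).flatMap (fun k => (pvNextA td)^[k] [root])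
      = (List.range (N + 1)).flatMap (fun k => (pvNextA td)^[k] [root]) := by
    apply pv_range_trunc _ (N + 1) _ (by omega)
    intro k hk
    exact hdeadA k (by omega)
  rw [hSA]
  -- B side: the stack loop output
  have hsingle : [((0 : Int), root)] = ([root] : List String).map (fun p => ((0 : Int), p)) := rfl
  have hdeadB0 : (pvNextB td)^[N] [((0 : Int), root)] = [] := by
    rw [hsingle, pv_pairlevels, hpre']
    rfl
  have hdeadB : (pvNextB td)^[N + 1] [((0 : Int), root)] = [] := by
    rw [Function.iterate_succ_apply', hdeadB0]
    rfl
  have hfuelle : pvFuelB td (N + 1) [((0 : Int), root)]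
      ≤ pvFuelB td (tree.length + 2) [((0 : Int), root)] := by
    have h : tree.length + 2 = N + 1 := by omega
    rw [h]
  have horder : dfsStackB td (pvFuelB td (tree.length + 2) [((0 : Int), root)])
        [((0 : Int), root)] []
      = pvPreN td N ((0 : Int), root) := by
    rw [pv_stack_eq, List.nil_append,
      pv_pre_eq_preN td _ N _ hdeadB hfuelle]
    simp
  rw [horder]
  -- sort = bucket concatenation = pair levels
  have hbound : ∀ dp ∈ pvPreN td N ((0 : Int), root), 0 ≤ dp.1 ∧ dp.1 < ((N + 1 : Nat) : Int) := by
    intro dp hdp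
    have h := pv_preN_bound td N ((0 : Int), root) dp hdp
    push_cast at h ⊢
    omega
  rw [pv_counting_sort (N + 1) _ hbound]
  have hbuckets : (List.range (N + 1)).flatMap
        (fun (k : Nat) => (pvPreN td N ((0 : Int), root)).filter (fun dp => dp.1 == ((k : Nat) : Int)))
      = (List.range (N + 1)).flatMap
        (fun (k : Nat) => ((pvNextA td)^[k] [root]).map (fun p => (((k : Nat) : Int), p))) := by
    apply List.flatMap_congr
    intro k hk
    rw [List.mem_range] at hk
    have hpred : (fun dp : Int × String => dp.1 == ((k : Nat) : Int))
        = (fun dp : Int × String => dp.1 == ((0 : Int), root).1 + ((k : Nat) : Int)) := by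
      funext dp
      simp
    rw [hpred, pv_preN_filter td N ((0 : Int), root) k (by omega)]
    rw [hsingle, pv_pairlevels]
    apply List.map_congr_left
    intro p _
    simp
  rw [hbuckets]
  -- the enumeration pass
  rw [pv_enum_fold]
  have hproj : ((List.range (N + 1)).flatMap
        (fun (k : Nat) => ((pvNextA td)^[k] [root]).map (fun p => (((k : Nat) : Int), p)))).map (fun dp => dp.2)
      = (List.range (N + 1)).flatMap (fun k => (pvNextA td)^[k] [root]) := by
    rw [List.map_flatMap]
    apply List.flatMap_congr
    intro k _
    rw [List.map_map]
    simp
  rw [hproj]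
  rw [add_zero]
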